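-- pv_equiv track=rewrite | github.com/dhwpdnr/coding_test | programmers/2023/2301/230131_2.py | solution
-- ===== SOURCE A (Python) =====
-- def solution(keyinput, board):
--     x = board[0] // 2
--     y = board[1] // 2
--     answer = [0, 0]
--     for i in keyinput:
--         if i == "left":
--             if answer[0] == -x:
--                 pass
--             else:
--                 answer[0] -= 1
--         elif i == "right":
--             if answer[0] == x:
--                 pass
--             else:
--                 answer[0] += 1
--         elif i == "up":
--             if answer[1] == y:
--                 pass
--             else:
--                 answer[1] += 1
--         elif i == "down":
--             if answer[1] == -y:
--                 pass
--             else: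
--                 answer[1] -= 1
--
--     return answer
-- ===== SOURCE B (Python) =====
-- def solution(keyinput, board):
--     # B: X and Y are independent; one per-axis pass each.
--     x = board[0] // 2
--     y = board[1] // 2
--     px = 0
--     for i in keyinput:
--         if i == "left":
--             if px != -x:
--                 px -= 1
--         elif i == "right":
--             if px != x:
--                 px += 1
--     py = 0
--     for i in keyinput:
--         if i == "up":
--             if py != y:
--                 py += 1
--         elif i == "down":
--             if py != -y:
--                 py -= 1
--     return [px, py]
-- ===== Notes on version B (the rewrite author's own statement) =====
-- stated objective: simpler
-- what changed: Replaces the single fold over a mutable [x,y] pair with two independent per-axis passes (X from left/right only, Y from up/down only), exploiting that the axes never interact.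
import Mathlib
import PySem

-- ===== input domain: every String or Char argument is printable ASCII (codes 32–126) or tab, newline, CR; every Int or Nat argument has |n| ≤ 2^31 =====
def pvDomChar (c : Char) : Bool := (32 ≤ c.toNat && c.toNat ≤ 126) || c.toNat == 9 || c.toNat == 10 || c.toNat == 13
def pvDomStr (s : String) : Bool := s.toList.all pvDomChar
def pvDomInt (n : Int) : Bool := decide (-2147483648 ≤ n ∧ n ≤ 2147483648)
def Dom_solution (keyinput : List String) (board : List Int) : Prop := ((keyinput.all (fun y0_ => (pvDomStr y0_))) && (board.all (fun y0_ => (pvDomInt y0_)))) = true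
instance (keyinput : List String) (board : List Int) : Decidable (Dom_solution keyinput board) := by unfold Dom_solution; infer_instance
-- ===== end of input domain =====

-- B: X and Y are independent, so compute them in two per-axis passes instead of one fold over a pair (objective: simpler decomposition).
-- ===== PORT A =====
def stepA (x y : Int) (ans : Int × Int) (i : String) : Int × Int :=
  if i = "left" then (if ans.1 = -x then ans else (ans.1 - 1, ans.2))
  else if i = "right" then (if ans.1 = x then ans else (ans.1 + 1, ans.2))
  else if i = "up" then (if ans.2 = y then ans else (ans.1, ans.2 + 1))
  else if i = "down" then (if ans.2 = -y then ans else (ans.1, ans.2 - 1))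
  else ans

def solution (keyinput : List String) (board : List Int) : List Int :=
  let x := PySem.Int.floordiv (board.getD 0 0) 2   -- board[0]; Pre_ guarantees the index is in range
  let y := PySem.Int.floordiv (board.getD 1 0) 2
  let ans := keyinput.foldl (stepA x y) (0, 0)
  [ans.1, ans.2]

-- ===== PORT B =====
def stepX (x px : Int) (i : String) : Int :=
  if i = "left" then (if px ≠ -x then px - 1 else px)
  else if i = "right" then (if px ≠ x then px + 1 else px)
  else px

def stepY (y py : Int) (i : String) : Int :=
  if i = "up" then (if py ≠ y then py + 1 else py)
  else if i = "down" then (if py ≠ -y then py - 1 else py)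
  else py

def solution_alt (keyinput : List String) (board : List Int) : List Int :=
  let x := PySem.Int.floordiv (board.getD 0 0) 2
  let y := PySem.Int.floordiv (board.getD 1 0) 2
  [keyinput.foldl (stepX x) 0, keyinput.foldl (stepY y) 0]

-- ===== PRECONDITION & SPEC =====
-- A indexes board[0] and board[1]: it raises IndexError when board has fewer than 2 elements.
def Pre_solution (keyinput : List String) (board : List Int) : Prop := 2 ≤ board.length
instance (keyinput : List String) (board : List Int) : Decidable (Pre_solution keyinput board) := by unfold Pre_solution; infer_instance
def pvWitness_solution : List String × List Int := (["left", "up"], [4, 4])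
def Spec_solution (keyinput : List String) (board : List Int) (out : List Int) : Prop := out = solution_alt keyinput board
instance (keyinput : List String) (board : List Int) (out : List Int) : Decidable (Spec_solution keyinput board out) := by unfold Spec_solution; infer_instance

-- ===== CLAIM (what is proved, stated in full; the proofs are below) =====
def Claim_equal_solution : Prop := ∀ (keyinput : List String) (board : List Int), Dom_solution keyinput board → Pre_solution keyinput board → Spec_solution keyinput board (solution keyinput board)

-- ===== LEMMAS AND PROOFS =====
lemma foldA_split (x y : Int) (ks : List String) (p : Int × Int) :
    ks.foldl (stepA x y) p = (ks.foldl (stepX x) p.1, ks.foldl (stepY y) p.2) := by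
  induction ks generalizing p with
  | nil => rfl
  | cons k ks ih =>
    simp only [List.foldl_cons, ih]
    congr 1 <;> (simp [stepA, stepX, stepY]; split_ifs <;> simp_all)

-- ===== VERDICT (by name: the statement is the Claim_ definition above) =====
theorem solution_spec : Claim_equal_solution := by
  intro ks bd _ _
  unfold Spec_solution solution solution_alt
  simp [foldA_split]
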